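-- pv_equiv track=rewrite | github.com/pr1m8/haive-agents | src/haive/agents/conversation/directed/agent.py | _sanitize_name_for_openai
-- ===== SOURCE A (Python) =====
-- def _sanitize_name_for_openai(name: str) -> str:
--     """Sanitize a name to be compatible with OpenAI's API requirements.
--
--     OpenAI's name field must match the pattern '^[^\\s<|\\\\/>]+$'
--     This means no spaces, <, |, \\, /, or >
--
--     Args:
--         name: The original name
--
--     Returns:
--         Sanitized name safe for OpenAI API
--     """
--     # Replace spaces with underscores
--     sanitized = name.replace(" ", "_")
--
--     # Remove any other forbidden characters
--     forbidden_chars = ["<", "|", "\\", "/", ">"]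
--     for char in forbidden_chars:
--         sanitized = sanitized.replace(char, "")
--
--     # Ensure the name is not empty
--     if not sanitized:
--         sanitized = "User"
--
--     return sanitized
-- ===== SOURCE B (Python) =====
-- def _sanitize_name_for_openai(name: str) -> str:
--     """Single pass over the characters instead of six whole-string replace passes."""
--     forbidden = {'<', '|', '\\', '/', '>'}
--     out = ''.join('_' if c == ' ' else '' if c in forbidden else c for c in name)
--     return out if out else 'User'
-- ===== Notes on version B (the rewrite author's own statement) =====
-- stated objective: simpler
-- what changed: Replaces six sequential whole-string .replace passes with one single pass over the characters that maps each space to an underscore, drops the five forbidden characters, and keeps everything else.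
import Mathlib
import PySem

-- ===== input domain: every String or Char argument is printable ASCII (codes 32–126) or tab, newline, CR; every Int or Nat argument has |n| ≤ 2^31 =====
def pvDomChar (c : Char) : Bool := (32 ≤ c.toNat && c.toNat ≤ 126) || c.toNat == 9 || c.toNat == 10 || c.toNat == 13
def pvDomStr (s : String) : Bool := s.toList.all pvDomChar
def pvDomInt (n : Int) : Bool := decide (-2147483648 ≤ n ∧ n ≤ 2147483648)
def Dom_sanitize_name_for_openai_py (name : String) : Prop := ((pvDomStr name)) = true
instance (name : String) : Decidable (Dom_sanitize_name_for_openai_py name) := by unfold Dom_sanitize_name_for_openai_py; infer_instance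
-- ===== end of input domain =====

-- B replaces A's six sequential whole-string replace passes with one single character pass (objective: simpler).

-- ===== PORT A =====
def sanitize_name_for_openai_py (name : String) : String :=
  -- sanitized = name.replace(" ", "_")
  let sanitized := PySem.Str.replace name " " "_"
  -- for char in forbidden_chars: sanitized = sanitized.replace(char, "")
  let sanitized := ["<", "|", "\\", "/", ">"].foldl (fun s ch => PySem.Str.replace s ch "") sanitized
  -- if not sanitized: sanitized = "User"
  if sanitized = "" then "User" else sanitized

-- ===== PORT B =====
def sanitize_name_for_openai_py_alt (name : String) : String :=
  -- ''.join('_' if c == ' ' else '' if c in forbidden else c for c in name)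
  let out := String.ofList (name.toList.flatMap (fun c =>
    if c = ' ' then ['_']
    else if c = '<' ∨ c = '|' ∨ c = '\\' ∨ c = '/' ∨ c = '>' then []
    else [c]))
  if out = "" then "User" else out

-- ===== PRECONDITION & SPEC =====
def Spec_sanitize_name_for_openai_py (name : String) (out : String) : Prop := out = sanitize_name_for_openai_py_alt name
instance (name : String) (out : String) : Decidable (Spec_sanitize_name_for_openai_py name out) := by unfold Spec_sanitize_name_for_openai_py; infer_instance

-- ===== CLAIM (what is proved, stated in full; the proofs are below) =====
def Claim_equal_sanitize_name_for_openai_py : Prop := ∀ (name : String), Dom_sanitize_name_for_openai_py name → Spec_sanitize_name_for_openai_py name (sanitize_name_for_openai_py name)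

-- ===== LEMMAS AND PROOFS =====

-- Chars.replace with a single-character pattern is a flatMap over the characters.
theorem replace_go_single (a : Char) (new : List Char) :
    ∀ (l : List Char) (fuel : Nat) (acc : List Char), l.length ≤ fuel →
      PySem.Chars.replace.go [a] new fuel l acc
        = acc.reverse ++ l.flatMap (fun c => if c = a then new else [c]) := by
  intro l
  induction l with
  | nil =>
      intro fuel acc _
      cases fuel <;> simp [PySem.Chars.replace.go]
  | cons c t ih =>
      intro fuel acc hf
      cases fuel with
      | zero => simp at hf
      | succ n =>
        rw [PySem.Chars.replace.go]
        by_cases hca : c = a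
        · subst hca
          have : List.isPrefixOf [c] (c :: t) = true := by simp [List.isPrefixOf]
          rw [this]
          simp only [if_true, List.length_cons, List.length_nil, List.drop_succ_cons, List.drop_zero]
          rw [ih n (new.reverse ++ acc) (by simp at hf; omega)]
          simp
        · have : List.isPrefixOf [a] (c :: t) = false := by
            simp [List.isPrefixOf]
            exact fun h => (hca h.symm).elim
          rw [this]
          simp only [Bool.false_eq_true, if_false]
          rw [ih n (c :: acc) (by simp at hf; omega)]
          simp [hca]

theorem replace_single (l : List Char) (a : Char) (new : List Char) :
    PySem.Chars.replace l [a] new = l.flatMap (fun c => if c = a then new else [c]) := by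
  rw [PySem.Chars.replace]
  simp only [List.isEmpty_cons, Bool.false_eq_true, if_false]
  simpa using replace_go_single a new l l.length [] (le_refl _)

theorem sanitize_chars_eq (cs : List Char) :
    (((((cs.flatMap (fun c => if c = ' ' then ['_'] else [c])).flatMap
        (fun c => if c = '<' then [] else [c])).flatMap
        (fun c => if c = '|' then [] else [c])).flatMap
        (fun c => if c = '\\' then [] else [c])).flatMap
        (fun c => if c = '/' then [] else [c])).flatMap
        (fun c => if c = '>' then [] else [c])
      = cs.flatMap (fun c =>
          if c = ' ' then ['_']
          else if c = '<' ∨ c = '|' ∨ c = '\\' ∨ c = '/' ∨ c = '>' then []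
          else [c]) := by
  simp only [List.flatMap_assoc]
  refine List.flatMap_congr ?_
  intro c _
  by_cases h1 : c = ' ' <;> by_cases h2 : c = '<' <;> by_cases h3 : c = '|' <;>
    by_cases h4 : c = '\\' <;> by_cases h5 : c = '/' <;> by_cases h6 : c = '>' <;>
    simp [h1, h2, h3, h4, h5, h6] <;> subst_vars <;> simp_all <;> decide

theorem sanitize_string_eq (name : String) :
    (["<", "|", "\\", "/", ">"].foldl (fun s ch => PySem.Str.replace s ch "")
        (PySem.Str.replace name " " "_"))
      = String.ofList (name.toList.flatMap (fun c =>
          if c = ' ' then ['_']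
          else if c = '<' ∨ c = '|' ∨ c = '\\' ∨ c = '/' ∨ c = '>' then []
          else [c])) := by
  apply String.toList_injective
  simp only [List.foldl, PySem.Str.toList_replace]
  show PySem.Chars.replace (PySem.Chars.replace (PySem.Chars.replace (PySem.Chars.replace
      (PySem.Chars.replace (PySem.Chars.replace name.toList " ".toList "_".toList)
        "<".toList "".toList) "|".toList "".toList) "\\".toList "".toList)
      "/".toList "".toList) ">".toList "".toList = _
  have h1 : (" " : String).toList = [' '] := rfl
  have h2 : ("_" : String).toList = ['_'] := rfl
  rw [h1, h2]
  rw [show ("<" : String).toList = ['<'] from rfl,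
      show ("|" : String).toList = ['|'] from rfl,
      show ("\\" : String).toList = ['\\'] from rfl,
      show ("/" : String).toList = ['/'] from rfl,
      show (">" : String).toList = ['>'] from rfl,
      show ("" : String).toList = [] from rfl]
  rw [replace_single, replace_single, replace_single, replace_single, replace_single,
      replace_single]
  rw [sanitize_chars_eq]
  simp

-- ===== VERDICT (by name: the statement is the Claim_ definition above) =====
theorem sanitize_name_for_openai_py_spec : Claim_equal_sanitize_name_for_openai_py := by
  intro name _
  unfold Spec_sanitize_name_for_openai_py sanitize_name_for_openai_py sanitize_name_for_openai_py_alt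
  simp only [sanitize_string_eq]
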